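-- pv_equiv track=rewrite | github.com/liuzikai/alfred-text-utils | remove_single_linefeeds.py | remove_single_linefeeds
-- ===== SOURCE A (Python) =====
-- def remove_single_linefeeds(text):
--     result = []
--     i = 0
--     length = len(text)
--
--     while i < length:
--         if text[i] == '\n':
--             # Check if the next character is also a linefeed
--             if i + 1 < length and text[i + 1] == '\n':
--                 # Add both linefeeds to the result and skip ahead
--                 result.append('\n')
--                 result.append('\n')
--                 i += 2
--             else:
--                 # Replace a single linefeed with a space
--                 result.append(' ')
--                 i += 1
--         else:
--             # Add the character to the result as is
--             result.append(text[i])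
--             i += 1
--
--     # Join the list into a single string and return it
--     return ''.join(result)
-- ===== SOURCE B (Python) =====
-- def _flush(run):
--     # a run of `run` newlines keeps its even part and turns an odd leftover into a space
--     return '\n' * (run - run % 2) + ' ' * (run % 2)
--
--
-- def remove_single_linefeeds(text):
--     parts = []
--     run = 0
--     for ch in text:
--         if ch == '\n':
--             run += 1
--         else:
--             parts.append(_flush(run) + ch)
--             run = 0
--     parts.append(_flush(run))
--     return ''.join(parts)
-- ===== Notes on version B (the rewrite author's own statement) =====
-- stated objective: alternative
-- what changed: Replaces A's index-based single-character lookahead/pairing loop with a run-length state machine: one counter accumulates each maximal newline run and a parity rule flushes it (even part of the run kept as newlines, odd leftover emitted as a space) at run end.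
import Mathlib
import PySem

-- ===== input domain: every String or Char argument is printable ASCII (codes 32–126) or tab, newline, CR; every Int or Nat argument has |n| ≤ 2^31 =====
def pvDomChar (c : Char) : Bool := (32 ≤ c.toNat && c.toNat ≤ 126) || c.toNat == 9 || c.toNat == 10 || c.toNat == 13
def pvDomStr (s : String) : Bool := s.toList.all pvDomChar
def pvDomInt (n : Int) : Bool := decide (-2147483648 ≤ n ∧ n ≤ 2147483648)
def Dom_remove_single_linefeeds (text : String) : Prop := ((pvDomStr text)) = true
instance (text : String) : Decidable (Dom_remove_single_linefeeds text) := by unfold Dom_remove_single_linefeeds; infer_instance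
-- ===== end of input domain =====

-- B replaces A's lookahead pairing loop with a run-length counter plus a parity rule (alternative decomposition, same cost).

-- ===== PORT A =====
-- A's while loop over index i, transcribed as recursion over the remaining characters
-- (advancing i by 1 or 2 = consuming one or two list cells).
def goA : List Char → List Char
  | [] => []
  | c :: rest =>
    if c = '\n' then
      match rest with
      | c2 :: rest2 =>
        if c2 = '\n' then '\n' :: '\n' :: goA rest2
        else ' ' :: goA (c2 :: rest2)
      | [] => [' ']
    else c :: goA rest

def remove_single_linefeeds (text : String) : String := String.mk (goA text.toList)

-- ===== PORT B =====
-- Source B's _flush: a run of `run` newlines keeps its even part, odd leftover becomes a space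
def flushB (run : Nat) : List Char :=
  List.replicate (run - run % 2) '\n' ++ List.replicate (run % 2) ' '

-- Source B's for-loop with the `run` counter
def goB : List Char → Nat → List Char
  | [], run => flushB run
  | c :: rest, run =>
    if c = '\n' then goB rest (run + 1)
    else flushB run ++ c :: goB rest 0

def remove_single_linefeeds_alt (text : String) : String := String.mk (goB text.toList 0)

-- ===== PRECONDITION & SPEC =====
def Spec_remove_single_linefeeds (text : String) (out : String) : Prop := out = remove_single_linefeeds_alt text
instance (text : String) (out : String) : Decidable (Spec_remove_single_linefeeds text out) := by unfold Spec_remove_single_linefeeds; infer_instance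

-- ===== CLAIM (what is proved, stated in full; the proofs are below) =====
def Claim_equal_remove_single_linefeeds : Prop := ∀ (text : String), Dom_remove_single_linefeeds text → Spec_remove_single_linefeeds text (remove_single_linefeeds text)

-- ===== LEMMAS AND PROOFS =====

lemma flushB_succ_succ (n : Nat) : flushB (n + 2) = '\n' :: '\n' :: flushB n := by
  unfold flushB
  have h2 : n + 2 - (n + 2) % 2 = (n - n % 2) + 2 := by omega
  rw [Nat.add_mod_right n 2] at h2 ⊢
  rw [h2]
  simp [List.replicate_succ]

lemma goA_cons_ne (c : Char) (rest : List Char) (hc : c ≠ '\n') :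
    goA (c :: rest) = c :: goA rest := by
  cases rest <;> simp [goA, hc]

lemma goA_nl_nl (rest : List Char) : goA ('\n' :: '\n' :: rest) = '\n' :: '\n' :: goA rest := by
  simp [goA]

lemma goA_nl_ne (c : Char) (rest : List Char) (hc : c ≠ '\n') :
    goA ('\n' :: c :: rest) = ' ' :: goA (c :: rest) := by
  simp [goA, hc]

lemma goA_replicate (n : Nat) : goA (List.replicate n '\n') = flushB n := by
  induction n using Nat.strong_induction_on with
  | _ n ih =>
    match n with
    | 0 => simp [goA, flushB]
    | 1 => simp [goA, flushB, List.replicate]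
    | n + 2 =>
      rw [flushB_succ_succ]
      show goA ('\n' :: '\n' :: List.replicate n '\n') = _
      rw [goA_nl_nl, ih n (by omega)]

lemma goA_replicate_cons (n : Nat) (c : Char) (rest : List Char) (hc : c ≠ '\n') :
    goA (List.replicate n '\n' ++ c :: rest) = flushB n ++ c :: goA rest := by
  induction n using Nat.strong_induction_on with
  | _ n ih =>
    match n with
    | 0 => simpa [flushB] using goA_cons_ne c rest hc
    | 1 =>
      show goA ('\n' :: c :: rest) = _
      rw [goA_nl_ne c rest hc, goA_cons_ne c rest hc]
      simp [flushB, List.replicate]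
    | n + 2 =>
      rw [flushB_succ_succ]
      show goA ('\n' :: '\n' :: (List.replicate n '\n' ++ c :: rest)) = _
      rw [goA_nl_nl, ih n (by omega)]
      simp

lemma goB_eq_goA (l : List Char) : ∀ run : Nat, goB l run = goA (List.replicate run '\n' ++ l) := by
  induction l with
  | nil => intro run; simp [goB, goA_replicate]
  | cons c rest ih =>
    intro run
    by_cases hc : c = '\n'
    · subst hc
      show goB rest (run + 1) = _
      rw [ih (run + 1)]
      have : List.replicate (run + 1) '\n' ++ rest = List.replicate run '\n' ++ '\n' :: rest := by
        rw [List.replicate_succ' (n := run)]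
        simp
      rw [this]
    · simp only [goB, if_neg hc]
      rw [goA_replicate_cons run c rest hc, ih 0]
      simp

-- ===== VERDICT (by name: the statement is the Claim_ definition above) =====
theorem remove_single_linefeeds_spec : Claim_equal_remove_single_linefeeds := by
  intro text _
  unfold Spec_remove_single_linefeeds remove_single_linefeeds remove_single_linefeeds_alt
  rw [goB_eq_goA]
  simp
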